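-- pv_equiv track=rewrite | github.com/EgorBelov/event_mind | app/recommender/user_model.py | apply_feedback_to_weights
-- ===== SOURCE A (Python) =====
-- LIKE_BONUS = 3
--
-- SAVE_BONUS = 1
--
-- DISLIKE_PENALTY = 2
--
-- MIN_TOPIC_WEIGHT = 0
--
-- def apply_feedback_to_weights(
--     current_weights: dict[str, int],
--     event_topics: list[str],
--     action: str,
-- ) -> dict[str, int]:
--     weights = dict(current_weights)
--
--     for topic in event_topics:
--         current_value = weights.get(topic, 0)
--
--         if action == "like":
--             weights[topic] = current_value + LIKE_BONUS
--         elif action == "save":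
--             weights[topic] = current_value + SAVE_BONUS
--         elif action == "dislike":
--             weights[topic] = max(MIN_TOPIC_WEIGHT, current_value - DISLIKE_PENALTY)
--
--     return weights
-- ===== SOURCE B (Python) =====
-- LIKE_BONUS = 3
-- SAVE_BONUS = 1
-- DISLIKE_PENALTY = 2
-- MIN_TOPIC_WEIGHT = 0
--
--
-- def apply_feedback_to_weights(current_weights, event_topics, action):
--     # Count each topic once, then apply one combined update per distinct topic,
--     # with the action branch hoisted out of the loop.
--     counts = {}
--     for topic in event_topics:
--         counts[topic] = counts.get(topic, 0) + 1
--
--     weights = dict(current_weights)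
--     if action == "like":
--         for topic, c in counts.items():
--             weights[topic] = weights.get(topic, 0) + LIKE_BONUS * c
--     elif action == "save":
--         for topic, c in counts.items():
--             weights[topic] = weights.get(topic, 0) + SAVE_BONUS * c
--     elif action == "dislike":
--         for topic, c in counts.items():
--             weights[topic] = max(MIN_TOPIC_WEIGHT, weights.get(topic, 0) - DISLIKE_PENALTY * c)
--     return weights
-- ===== Notes on version B (the rewrite author's own statement) =====
-- stated objective: alternative
-- what changed: B first builds a frequency table of the topics, then applies one combined update per distinct topic (like/save add BONUS*count, dislike clamps once with max(0, v - PENALTY*count)), with the action branch hoisted out of the loop, instead of A's per-occurrence repeated updates inside the loop.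
import Mathlib
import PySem

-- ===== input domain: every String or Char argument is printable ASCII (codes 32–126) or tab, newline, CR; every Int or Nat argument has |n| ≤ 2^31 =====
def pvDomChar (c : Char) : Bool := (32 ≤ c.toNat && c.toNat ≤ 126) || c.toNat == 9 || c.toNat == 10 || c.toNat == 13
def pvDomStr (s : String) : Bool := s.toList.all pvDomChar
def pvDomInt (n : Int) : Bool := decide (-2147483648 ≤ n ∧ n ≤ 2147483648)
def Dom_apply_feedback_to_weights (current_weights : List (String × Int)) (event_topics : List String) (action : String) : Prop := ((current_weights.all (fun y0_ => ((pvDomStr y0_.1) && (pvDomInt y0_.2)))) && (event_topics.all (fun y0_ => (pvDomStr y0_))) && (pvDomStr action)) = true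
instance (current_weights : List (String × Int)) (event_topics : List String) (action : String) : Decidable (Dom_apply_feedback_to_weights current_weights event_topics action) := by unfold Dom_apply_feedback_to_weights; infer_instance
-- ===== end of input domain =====

-- B builds a topic count table and applies one combined update per distinct topic (action branch
-- hoisted out of the loop) instead of A's per-occurrence updates; equivalence proved on Dom.


-- ===== PORT A =====
-- A: one dict update per occurrence of a topic; the action is re-tested inside the loop.
def apply_feedback_to_weights (current_weights : List (String × Int)) (event_topics : List String) (action : String) : List (String × Int) :=
  let weights : PySem.Dict String Int := PySem.Dict.ofList current_weights
  let weights := event_topics.foldl (fun w topic =>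
    let current_value := w.getD topic 0
    if action == "like" then w.insert topic (current_value + 3)
    else if action == "save" then w.insert topic (current_value + 1)
    else if action == "dislike" then w.insert topic (max 0 (current_value - 2))
    else w) weights
  weights.items

-- ===== PORT B =====
-- B: build a count table first, then one combined update per distinct topic,
-- with the action branch hoisted out of the loop.
def apply_feedback_to_weights_alt (current_weights : List (String × Int)) (event_topics : List String) (action : String) : List (String × Int) :=
  let counts : PySem.Dict String Int :=
    event_topics.foldl (fun d topic => d.insert topic (d.getD topic 0 + 1)) PySem.Dict.empty
  let weights : PySem.Dict String Int := PySem.Dict.ofList current_weights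
  let weights :=
    if action == "like" then
      counts.items.foldl (fun w p => w.insert p.1 (w.getD p.1 0 + 3 * p.2)) weights
    else if action == "save" then
      counts.items.foldl (fun w p => w.insert p.1 (w.getD p.1 0 + 1 * p.2)) weights
    else if action == "dislike" then
      counts.items.foldl (fun w p => w.insert p.1 (max 0 (w.getD p.1 0 - 2 * p.2))) weights
    else weights
  weights.items

-- ===== PRECONDITION & SPEC =====
def Spec_apply_feedback_to_weights (current_weights : List (String × Int)) (event_topics : List String) (action : String) (out : List (String × Int)) : Prop := out = apply_feedback_to_weights_alt current_weights event_topics action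
instance (current_weights : List (String × Int)) (event_topics : List String) (action : String) (out : List (String × Int)) : Decidable (Spec_apply_feedback_to_weights current_weights event_topics action out) := by unfold Spec_apply_feedback_to_weights; infer_instance

-- ===== CLAIM (what is proved, stated in full; the proofs are below) =====
def Claim_equal_apply_feedback_to_weights : Prop := ∀ (current_weights : List (String × Int)) (event_topics : List String) (action : String), Dom_apply_feedback_to_weights current_weights event_topics action → Spec_apply_feedback_to_weights current_weights event_topics action (apply_feedback_to_weights current_weights event_topics action)

-- ===== LEMMAS AND PROOFS =====

-- Re-inserting the same key overwrites: only the second value remains.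
theorem pv_insert_insert_same (d : PySem.Dict String Int) (t : String) (a b : Int) :
    (d.insert t a).insert t b = d.insert t b := by
  apply PySem.Dict.ext
  by_cases h : d.contains t = true
  · rw [PySem.Dict.items_insert_of_contains _ _ (PySem.Dict.contains_insert_self ..),
        PySem.Dict.items_insert_of_contains _ _ h,
        PySem.Dict.items_insert_of_contains _ _ h, List.map_map]
    apply List.map_congr_left
    intro p _
    by_cases hp : p.1 = t <;> simp [Function.comp, hp]
  · rw [PySem.Dict.items_insert_of_contains _ _ (PySem.Dict.contains_insert_self ..),
        PySem.Dict.items_insert_of_not_contains _ _ (by simpa using h),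
        PySem.Dict.items_insert_of_not_contains _ _ (by simpa using h),
        List.map_append]
    congr 1
    · have : List.map (fun p => if (p.1 == t) = true then (t, b) else p) d.items
          = List.map id d.items := by
        apply List.map_congr_left
        intro p hp
        have hne : p.1 ≠ t := by
          intro heq
          have ht : t ∈ d.keys := by
            have := List.mem_map_of_mem (f := Prod.fst) hp
            simpa [PySem.Dict.keys, heq] using this
          rw [← PySem.Dict.contains_iff_mem_keys] at ht
          simp [ht] at h
        simp [hne]
      simpa using this
    · simp

-- An in-place overwrite of an existing key t commutes with inserting a different key k.
theorem pv_insert_comm (d : PySem.Dict String Int) (t k : String) (v w : Int)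
    (hne : t ≠ k) (ht : d.contains t = true) :
    (d.insert k w).insert t v = (d.insert t v).insert k w := by
  have h1 : (d.insert k w).contains t = true := by
    rw [PySem.Dict.contains_insert]; simp [ht]
  apply PySem.Dict.ext
  by_cases hk : d.contains k = true
  · have h2 : (d.insert t v).contains k = true := by
      rw [PySem.Dict.contains_insert]; simp [hk]
    rw [PySem.Dict.items_insert_of_contains _ _ h1,
        PySem.Dict.items_insert_of_contains _ _ h2,
        PySem.Dict.items_insert_of_contains _ _ hk,
        PySem.Dict.items_insert_of_contains _ _ ht,
        List.map_map, List.map_map]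
    apply List.map_congr_left
    intro p _
    by_cases hp : p.1 = t <;> by_cases hq : p.1 = k <;>
      simp_all [Function.comp]
  · have h2 : (d.insert t v).contains k = false := by
      rw [PySem.Dict.contains_insert]
      simp only [Bool.or_eq_false_iff]
      constructor
      · simp only [beq_eq_false_iff_ne, ne_eq]
        exact fun h => hne h.symm
      · simpa using hk
    rw [PySem.Dict.items_insert_of_contains _ _ h1,
        PySem.Dict.items_insert_of_not_contains _ _ (by simpa using hk),
        PySem.Dict.items_insert_of_not_contains _ _ h2,
        PySem.Dict.items_insert_of_contains _ _ ht,
        List.map_append]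
    congr 1
    simp [hne.symm]

-- A keyed-insert loop over keys ≠ t does not change the value stored at t.
theorem pv_getD_foldl_not_mem (g : String → Int → Int) (l : List String)
    (d : PySem.Dict String Int) (t : String) (hl : t ∉ l) :
    (l.foldl (fun w s => w.insert s (g s (w.getD s 0))) d).getD t 0 = d.getD t 0 := by
  induction l generalizing d with
  | nil => rfl
  | cons s l ih =>
    simp only [List.mem_cons, not_or] at hl
    rw [List.foldl_cons, ih _ hl.2, PySem.Dict.getD_insert_of_ne _ _ _ hl.1]

-- An overwrite of an existing key t pushes through a keyed-insert loop over keys ≠ t.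
theorem pv_foldl_insert_out (g : String → Int → Int) (l : List String)
    (d : PySem.Dict String Int) (t : String) (v : Int)
    (hl : t ∉ l) (ht : d.contains t = true) :
    (l.foldl (fun w s => w.insert s (g s (w.getD s 0))) d).insert t v
      = l.foldl (fun w s => w.insert s (g s (w.getD s 0))) (d.insert t v) := by
  induction l generalizing d with
  | nil => rfl
  | cons s l ih =>
    simp only [List.mem_cons, not_or] at hl
    rw [List.foldl_cons, List.foldl_cons,
        ih _ hl.2 (by rw [PySem.Dict.contains_insert]; simp [ht]),
        pv_insert_comm _ _ _ _ _ hl.1 ht,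
        PySem.Dict.getD_insert_of_ne _ _ _ (fun h => hl.1 h.symm)]

-- Core: a per-occurrence update loop equals a single combined update per distinct topic.
theorem pv_foldl_grouped (f1 : Int → Int) (fc : Nat → Int → Int)
    (h1 : ∀ v, fc 1 v = f1 v) (hs : ∀ n v, fc (n + 1) v = f1 (fc n v))
    (xs : List String) (d : PySem.Dict String Int) :
    xs.foldl (fun w t => w.insert t (f1 (w.getD t 0))) d
      = (PySem.Set.ofList xs).foldl (fun w t => w.insert t (fc (xs.count t) (w.getD t 0))) d := by
  induction xs using List.reverseRecOn generalizing d with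
  | nil => rfl
  | append_singleton xs t ih =>
    rw [List.foldl_append, List.foldl_cons, List.foldl_nil, ih,
        PySem.Set.ofList_append_singleton]
    have hcnt_ne : ∀ s : String, s ≠ t → (xs ++ [t]).count s = xs.count s := by
      intro s hs'
      have hts : ¬ t = s := fun h => hs' h.symm
      simp [List.count_append, hts]
    have hcnt_t : (xs ++ [t]).count t = xs.count t + 1 := by
      simp [List.count_append]
    by_cases hm : t ∈ xs
    · rw [PySem.Set.add_of_mem ((PySem.Set.mem_ofList xs t).2 hm)]
      obtain ⟨l1, l2, hsplit⟩ := List.append_of_mem ((PySem.Set.mem_ofList xs t).2 hm)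
      have hnd : (l1 ++ t :: l2).Nodup := hsplit ▸ PySem.Set.nodup_ofList (xs := xs)
      rw [List.nodup_append] at hnd
      have ht1 : t ∉ l1 := fun h => hnd.2.2 t h t (by simp) rfl
      have ht2 : t ∉ l2 := (List.nodup_cons.1 hnd.2.1).1
      rw [hsplit, List.foldl_append, List.foldl_append, List.foldl_cons, List.foldl_cons]
      have congr1 : ∀ (d' : PySem.Dict String Int),
          l1.foldl (fun w s => w.insert s (fc ((xs ++ [t]).count s) (w.getD s 0))) d'
            = l1.foldl (fun w s => w.insert s (fc (xs.count s) (w.getD s 0))) d' := by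
        intro d'
        apply PySem.List.foldl_congr_mem
        intro acc x hx
        rw [hcnt_ne x (fun h => ht1 (h ▸ hx))]
      have congr2 : ∀ (d' : PySem.Dict String Int),
          l2.foldl (fun w s => w.insert s (fc ((xs ++ [t]).count s) (w.getD s 0))) d'
            = l2.foldl (fun w s => w.insert s (fc (xs.count s) (w.getD s 0))) d' := by
        intro d'
        apply PySem.List.foldl_congr_mem
        intro acc x hx
        rw [hcnt_ne x (fun h => ht2 (h ▸ hx))]
      rw [congr1, congr2, hcnt_t]
      set M := l1.foldl (fun w s => w.insert s (fc (xs.count s) (w.getD s 0))) d with hM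
      rw [pv_getD_foldl_not_mem (fun s v => fc (xs.count s) v) l2 _ t ht2,
          PySem.Dict.getD_insert_self,
          pv_foldl_insert_out (fun s v => fc (xs.count s) v) l2 _ t _ ht2
            (PySem.Dict.contains_insert_self ..),
          pv_insert_insert_same, hs]
    · have hm' : t ∉ PySem.Set.ofList xs := fun h => hm ((PySem.Set.mem_ofList xs t).1 h)
      rw [PySem.Set.add_of_not_mem hm', List.foldl_append, List.foldl_cons, List.foldl_nil]
      have congr1 : ∀ (d' : PySem.Dict String Int),
          (PySem.Set.ofList xs).foldl
              (fun w s => w.insert s (fc ((xs ++ [t]).count s) (w.getD s 0))) d'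
            = (PySem.Set.ofList xs).foldl
              (fun w s => w.insert s (fc (xs.count s) (w.getD s 0))) d' := by
        intro d'
        apply PySem.List.foldl_congr_mem
        intro acc x hx
        rw [hcnt_ne x (fun h => hm (h ▸ (PySem.Set.mem_ofList xs x).1 hx))]
      rw [congr1, hcnt_t]
      have hc0 : xs.count t = 0 := List.count_eq_zero.2 hm
      rw [hc0, h1]

-- A fold whose step ignores its input returns the start dict.
theorem pv_foldl_id (l : List String) (d : PySem.Dict String Int) :
    l.foldl (fun w _ => w) d = d := by
  induction l with
  | nil => rfl
  | cons s l ih => rw [List.foldl_cons]; exact ih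

-- ===== VERDICT (by name: the statement is the Claim_ definition above) =====
theorem apply_feedback_to_weights_spec : Claim_equal_apply_feedback_to_weights := by
  intro cw ts action _
  unfold Spec_apply_feedback_to_weights apply_feedback_to_weights apply_feedback_to_weights_alt
  rw [PySem.Dict.foldl_insert_getD_add_one_eq_counter]
  by_cases hlike : action = "like"
  · subst hlike
    simp only [BEq.rfl, if_pos, PySem.Dict.items_counter, List.foldl_map]
    rw [pv_foldl_grouped (fun v => v + 3) (fun n v => v + 3 * (n : Int))
      (by intro v; push_cast; ring) (by intro n v; push_cast; ring)]
  · by_cases hsave : action = "save"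
    · subst hsave
      simp only [beq_iff_eq, if_false, if_pos, String.reduceEq, BEq.rfl,
        PySem.Dict.items_counter, List.foldl_map]
      rw [pv_foldl_grouped (fun v => v + 1) (fun n v => v + 1 * (n : Int))
        (by intro v; push_cast; ring) (by intro n v; push_cast; ring)]
    · by_cases hdis : action = "dislike"
      · subst hdis
        simp only [beq_iff_eq, String.reduceEq, if_false, BEq.rfl, if_true,
          PySem.Dict.items_counter, List.foldl_map]
        rw [pv_foldl_grouped (fun v => max 0 (v - 2)) (fun n v => max 0 (v - 2 * (n : Int)))
          (by intro v; push_cast; omega) (by intro n v; push_cast; omega)]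
      · have l1 : (action == "like") = false := beq_eq_false_iff_ne.2 hlike
        have l2 : (action == "save") = false := beq_eq_false_iff_ne.2 hsave
        have l3 : (action == "dislike") = false := beq_eq_false_iff_ne.2 hdis
        simp only [l1, l2, l3, Bool.false_eq_true, if_false]
        rw [pv_foldl_id]
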